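-- pv_equiv track=rewrite | github.com/rosesweetroux02/Python_Development_AI | Python_Basics/A_decomposition_patter_exercise.py | funny_phrase
-- ===== SOURCE A (Python) =====
-- def double_vowel(str1):
--     new_str = ''
--     vowels = 'aeiou'
--     for key in str1:
--         if key in vowels:
--             new_str += key + key
--         else:
--             new_str += key
--
--     return new_str
--
-- def funny_phrase(str1):
--     new_str = []
--     new_list = str1.split(' ')
--     for i in range(len(new_list)):
--         if i % 2 > 0:
--             new_str.append(double_vowel(new_list[i]))
--         else:
--             new_str.append(new_list[i])
--     return (' ').join(new_str)
-- ===== SOURCE B (Python) =====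
-- def funny_phrase(str1):
--     out = []
--     w = 0
--     for ch in str1:
--         if ch == ' ':
--             out.append(ch)
--             w += 1
--         elif w % 2 == 1 and ch in 'aeiou':
--             out.append(ch)
--             out.append(ch)
--         else:
--             out.append(ch)
--     return ''.join(out)
-- ===== Notes on version B (the rewrite author's own statement) =====
-- stated objective: alternative
-- what changed: Single pass over the characters with a running word-index counter (incremented on every space), doubling vowels when the counter is odd, instead of split-on-space / per-word helper / join.
import Mathlib
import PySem

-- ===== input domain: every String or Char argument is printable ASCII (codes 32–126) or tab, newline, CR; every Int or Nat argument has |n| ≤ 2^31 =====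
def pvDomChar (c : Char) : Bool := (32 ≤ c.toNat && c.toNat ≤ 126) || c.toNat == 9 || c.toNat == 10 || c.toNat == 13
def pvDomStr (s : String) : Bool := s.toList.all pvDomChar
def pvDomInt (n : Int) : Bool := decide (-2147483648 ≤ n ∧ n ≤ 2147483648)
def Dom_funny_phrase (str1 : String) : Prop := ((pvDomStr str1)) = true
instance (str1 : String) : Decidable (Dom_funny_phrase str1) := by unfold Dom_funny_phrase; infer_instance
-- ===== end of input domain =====

-- B replaces A's split/per-word-helper/join pipeline by one pass over the characters with a
-- running word-index counter (alternative decomposition, same O(n) cost).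

-- ===== PORT A =====
-- helper: Python's double_vowel; 'key in vowels' is single-char membership in "aeiou"
def double_vowel (str1 : List Char) : List Char :=
  str1.foldl (fun new_str key =>
    if key ∈ ['a', 'e', 'i', 'o', 'u'] then new_str ++ [key, key] else new_str ++ [key]) []

def funny_phrase (str1 : String) : String :=
  let new_list := PySem.Chars.splitOn str1.toList [' ']
  let new_str := (PySem.List.pyRange 0 (new_list.length : Int)).foldl
    (fun acc i =>
      if PySem.Int.mod i 2 > 0 then acc ++ [double_vowel (PySem.List.pyGetD new_list i [])]
      else acc ++ [PySem.List.pyGetD new_list i []]) []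
  String.mk (PySem.Chars.join [' '] new_str)

-- ===== PORT B =====
def funny_phrase_alt (str1 : String) : String :=
  let st := str1.toList.foldl (fun (st : List Char × Int) ch =>
    if ch = ' ' then (st.1 ++ [ch], st.2 + 1)
    else if PySem.Int.mod st.2 2 = 1 ∧ ch ∈ ['a', 'e', 'i', 'o', 'u'] then (st.1 ++ [ch, ch], st.2)
    else (st.1 ++ [ch], st.2)) ([], 0)
  String.mk st.1

-- ===== PRECONDITION & SPEC =====
def Spec_funny_phrase (str1 : String) (out : String) : Prop := out = funny_phrase_alt str1
instance (str1 : String) (out : String) : Decidable (Spec_funny_phrase str1 out) := by unfold Spec_funny_phrase; infer_instance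

-- ===== CLAIM (what is proved, stated in full; the proofs are below) =====
def Claim_equal_funny_phrase : Prop := ∀ (str1 : String), Dom_funny_phrase str1 → Spec_funny_phrase str1 (funny_phrase str1)

-- ===== LEMMAS AND PROOFS =====

-- structural model of str.split(' ') with the current (reversed-later) word as accumulator
def pvSplit (pre : List Char) : List Char → List (List Char)
  | [] => [pre]
  | c :: rest => if c = ' ' then pre :: pvSplit [] rest else pvSplit (pre ++ [c]) rest

-- model of A's index loop: double_vowel the words at odd positions, counting from w
def pvProc : List (List Char) → Int → List (List Char)
  | [], _ => []
  | ws :: rest, w =>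
    (if PySem.Int.mod w 2 > 0 then double_vowel ws else ws) :: pvProc rest (w + 1)

-- model of B's single pass from word-counter w
def pvG : List Char → Int → List Char
  | [], _ => []
  | c :: rest, w =>
    if c = ' ' then ' ' :: pvG rest (w + 1)
    else (if PySem.Int.mod w 2 = 1 ∧ c ∈ ['a', 'e', 'i', 'o', 'u'] then [c, c] else [c]) ++ pvG rest w

lemma dv_flatMap (l : List Char) :
    double_vowel l = l.flatMap (fun c => if c ∈ ['a', 'e', 'i', 'o', 'u'] then [c, c] else [c]) := by
  have h : (fun (new_str : List Char) (key : Char) =>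
        if key ∈ ['a', 'e', 'i', 'o', 'u'] then new_str ++ [key, key] else new_str ++ [key])
      = fun acc x => acc ++ (if x ∈ ['a', 'e', 'i', 'o', 'u'] then [x, x] else [x]) := by
    funext a k; split_ifs <;> rfl
  rw [double_vowel, h, PySem.List.foldl_append_eq_flatMap]; rfl

lemma dv_append (a b : List Char) :
    double_vowel (a ++ b) = double_vowel a ++ double_vowel b := by
  simp [dv_flatMap]

lemma mod_two_cases (w : Int) : PySem.Int.mod w 2 = 0 ∨ PySem.Int.mod w 2 = 1 := by
  have h1 := PySem.Int.mod_nonneg w (b := 2) (by norm_num)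
  have h2 := PySem.Int.mod_lt w (b := 2) (by norm_num)
  omega

lemma go_eq (fuel : Nat) : ∀ (l cur : List Char) (accs : List (List Char)), l.length ≤ fuel →
    PySem.Chars.splitOn.go [' '] fuel l cur accs = accs.reverse ++ pvSplit cur.reverse l := by
  induction fuel with
  | zero =>
    intro l cur accs h
    have hl : l = [] := by cases l <;> simp_all
    subst hl
    simp [PySem.Chars.splitOn.go, pvSplit]
  | succ fuel ih =>
    intro l cur accs h
    cases l with
    | nil => simp [PySem.Chars.splitOn.go, pvSplit]
    | cons c rest =>
      by_cases hc : c = ' '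
      · subst hc
        have hp : [' '].isPrefixOf (' ' :: rest) = true := by simp [List.isPrefixOf]
        simp only [PySem.Chars.splitOn.go, hp, if_pos]
        rw [show List.drop ([' '] : List Char).length (' ' :: rest) = rest from rfl]
        rw [ih rest [] (cur.reverse :: accs) (by simpa using Nat.le_of_succ_le_succ h)]
        simp [pvSplit]
      · have hp : [' '].isPrefixOf (c :: rest) = false := by
          simp [List.isPrefixOf]; exact fun h' => hc h'.symm
        simp only [PySem.Chars.splitOn.go, hp, Bool.false_eq_true, if_false]
        rw [ih rest (c :: cur) accs (by simpa using Nat.le_of_succ_le_succ h)]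
        simp [pvSplit, hc]

lemma splitOn_eq (l : List Char) : PySem.Chars.splitOn l [' '] = pvSplit [] l := by
  rw [PySem.Chars.splitOn, go_eq (l.length + 1) l [] [] (by omega)]
  simp

lemma pvSplit_ne_nil : ∀ (l pre : List Char), pvSplit pre l ≠ [] := by
  intro l
  induction l with
  | nil => intro pre; simp [pvSplit]
  | cons c rest ih =>
    intro pre
    by_cases hc : c = ' ' <;> simp [pvSplit, hc, ih]

lemma pvProc_append_single : ∀ (xs : List (List Char)) (w : Int) (x : List Char),
    pvProc (xs ++ [x]) w
      = pvProc xs w ++ [if PySem.Int.mod (w + xs.length) 2 > 0 then double_vowel x else x] := by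
  intro xs
  induction xs with
  | nil => intro w x; simp [pvProc]
  | cons y ys ih =>
    intro w x
    simp only [List.cons_append, pvProc, ih (w + 1) x, List.length_cons]
    have : w + 1 + (ys.length : Int) = w + ((ys.length : Int) + 1) := by ring
    rw [this]
    push_cast
    ring_nf

lemma mapRange : ∀ (xs : List (List Char)),
    (List.map (fun (k : Nat) => (k : Int)) (List.range xs.length)).map
      (fun (i : Int) =>
        if PySem.Int.mod i 2 > 0 then double_vowel (PySem.List.pyGetD xs i [])
        else PySem.List.pyGetD xs i []) = pvProc xs 0 := by
  intro xs
  induction xs using List.reverseRecOn with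
  | nil => simp [pvProc]
  | append_singleton ys x ih =>
    rw [List.length_append, List.length_singleton, List.range_succ, List.map_append,
      List.map_append]
    have hpref : (List.map (fun (k : Nat) => (k : Int)) (List.range ys.length)).map
        (fun (i : Int) =>
          if PySem.Int.mod i 2 > 0 then double_vowel (PySem.List.pyGetD (ys ++ [x]) i [])
          else PySem.List.pyGetD (ys ++ [x]) i [])
        = (List.map (fun (k : Nat) => (k : Int)) (List.range ys.length)).map
        (fun (i : Int) =>
          if PySem.Int.mod i 2 > 0 then double_vowel (PySem.List.pyGetD ys i [])
          else PySem.List.pyGetD ys i []) := by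
      apply List.map_congr_left
      intro i hi
      rw [List.mem_map] at hi
      obtain ⟨k, hk, rfl⟩ := hi
      rw [List.mem_range] at hk
      rw [PySem.List.pyGetD_natCast, PySem.List.pyGetD_natCast, List.getD_append _ _ _ _ hk]
    have hlast : PySem.List.pyGetD (ys ++ [x]) ((ys.length : Nat) : Int) [] = x := by
      rw [PySem.List.pyGetD_natCast]
      simp [List.getD_eq_getElem?_getD]
    rw [hpref, ih, pvProc_append_single ys 0 x]
    simp [hlast]

lemma loopA (xs : List (List Char)) :
    (PySem.List.pyRange 0 (xs.length : Int)).foldl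
      (fun acc i =>
        if PySem.Int.mod i 2 > 0 then acc ++ [double_vowel (PySem.List.pyGetD xs i [])]
        else acc ++ [PySem.List.pyGetD xs i []]) [] = pvProc xs 0 := by
  have hfun : (fun (acc : List (List Char)) (i : Int) =>
        if PySem.Int.mod i 2 > 0 then acc ++ [double_vowel (PySem.List.pyGetD xs i [])]
        else acc ++ [PySem.List.pyGetD xs i []])
      = fun acc i => acc ++ [if PySem.Int.mod i 2 > 0 then double_vowel (PySem.List.pyGetD xs i [])
        else PySem.List.pyGetD xs i []] := by
    funext acc i; split_ifs <;> rfl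
  rw [hfun, PySem.List.foldl_append_singleton_eq_map, PySem.List.pyRange_zero_natCast,
    List.nil_append]
  exact mapRange xs

lemma dv_single (c : Char) :
    double_vowel [c] = if c ∈ ['a', 'e', 'i', 'o', 'u'] then [c, c] else [c] := by
  simp [dv_flatMap]

lemma joinH : ∀ (l pre : List Char) (w : Int),
    PySem.Chars.join [' '] (pvProc (pvSplit pre l) w)
      = (if PySem.Int.mod w 2 > 0 then double_vowel pre else pre) ++ pvG l w := by
  intro l
  induction l with
  | nil => intro pre w; simp [pvSplit, pvProc, pvG, PySem.Chars.join_singleton]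
  | cons c rest ih =>
    intro pre w
    by_cases hc : c = ' '
    · subst hc
      obtain ⟨a, as, ha⟩ := List.exists_cons_of_ne_nil (pvSplit_ne_nil rest [])
      have h1 : pvSplit pre (' ' :: rest) = pre :: a :: as := by
        rw [pvSplit, if_pos rfl, ha]
      have h2 := ih [] (w + 1)
      rw [ha] at h2
      have hcons : pvProc (a :: as) (w + 1)
          = (if PySem.Int.mod (w + 1) 2 > 0 then double_vowel a else a) :: pvProc as (w + 1 + 1) := rfl
      rw [h1,
        show pvProc (pre :: a :: as) w
          = (if PySem.Int.mod w 2 > 0 then double_vowel pre else pre) :: pvProc (a :: as) (w + 1) from rfl,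
        hcons, PySem.Chars.join_cons_cons, ← hcons, h2]
      have hG : pvG (' ' :: rest) w = ' ' :: pvG rest (w + 1) := by simp [pvG]
      rw [hG]
      simp [double_vowel, List.append_assoc]
    · have h1 : pvSplit pre (c :: rest) = pvSplit (pre ++ [c]) rest := by
        rw [pvSplit, if_neg hc]
      rw [h1, ih (pre ++ [c]) w]
      have hG : pvG (c :: rest) w
          = (if PySem.Int.mod w 2 = 1 ∧ c ∈ ['a', 'e', 'i', 'o', 'u'] then [c, c] else [c]) ++ pvG rest w := by
        rw [pvG, if_neg hc]
      rw [hG]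
      rcases mod_two_cases w with h | h
      · rw [h]
        simp [List.append_assoc]
      · rw [h]
        by_cases hv : c ∈ ['a', 'e', 'i', 'o', 'u'] <;>
          simp [hv, dv_append, dv_single, List.append_assoc]

lemma loopB : ∀ (l out : List Char) (w : Int),
    (l.foldl (fun (st : List Char × Int) ch =>
      if ch = ' ' then (st.1 ++ [ch], st.2 + 1)
      else if PySem.Int.mod st.2 2 = 1 ∧ ch ∈ ['a', 'e', 'i', 'o', 'u'] then (st.1 ++ [ch, ch], st.2)
      else (st.1 ++ [ch], st.2)) (out, w)).1 = out ++ pvG l w := by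
  intro l
  induction l with
  | nil => intro out w; simp [pvG]
  | cons c rest ih =>
    intro out w
    simp only [List.foldl_cons]
    by_cases hc : c = ' '
    · subst hc
      rw [if_pos rfl, ih (out ++ [' ']) (w + 1)]
      have hG : pvG (' ' :: rest) w = ' ' :: pvG rest (w + 1) := by simp [pvG]
      rw [hG]
      simp [List.append_assoc]
    · rw [if_neg hc]
      have hG : pvG (c :: rest) w
          = (if PySem.Int.mod w 2 = 1 ∧ c ∈ ['a', 'e', 'i', 'o', 'u'] then [c, c] else [c]) ++ pvG rest w := by
        rw [pvG, if_neg hc]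
      by_cases hv : PySem.Int.mod w 2 = 1 ∧ c ∈ ['a', 'e', 'i', 'o', 'u']
      · rw [if_pos hv, ih (out ++ [c, c]) w, hG, if_pos hv]
        simp [List.append_assoc]
      · rw [if_neg hv, ih (out ++ [c]) w, hG, if_neg hv]
        simp [List.append_assoc]

-- ===== VERDICT (by name: the statement is the Claim_ definition above) =====
theorem funny_phrase_spec : Claim_equal_funny_phrase := by
  intro s _
  unfold Spec_funny_phrase funny_phrase funny_phrase_alt
  simp only []
  rw [splitOn_eq, loopA, loopB s.toList [] 0, joinH s.toList [] 0]
  simp
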